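-- pv_equiv track=rewrite | github.com/thisIsJooS/Algorithm-Problem-Solving | BOJ/20327.py | oper3
-- ===== SOURCE A (Python) =====
-- def oper3(arr, l):
--     n = len(arr)
--     s = 2**l
--     for x in range(0, n, s):
--         for y in range(0, n, s):
--             tmp = []
--             for i in range(s):
--                 row = []
--                 for j in range(s):
--                     row.append(arr[x+i][y+j])
--                 tmp.append(row)
--
--             tmp = rotateRight(tmp)
--             for i in range(s):
--                 for j in range(s):
--                     arr[x+i][y+j] = tmp[i][j]
--     return arr
--
-- def rotateRight(arr):
--     n, m = len(arr), len(arr[0])    # 행, 열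
--
--     result = [[0] * n for _ in range(m)]
--     for i in range(n):
--         for j in range(m):
--             result[j][n-1-i] = arr[i][j]
--
--     return result
-- ===== SOURCE B (Python) =====
-- def oper3(arr, l):
--     # Same return value as A; also mutates arr in place like A (rows keep any tail cells beyond index n-1).
--     n = len(arr)
--     s = 2 ** l
--     new_rows = [[arr[i - i % s + (s - 1) - j % s][j - j % s + i % s] for j in range(n)]
--                 for i in range(n)]
--     for i in range(n):
--         arr[i][:n] = new_rows[i]
--     return arr
-- ===== Notes on version B (the rewrite author's own statement) =====
-- stated objective: simpler
-- what changed: Instead of extracting each 2^l block into a temporary matrix, rotating it with rotateRight and copying it back, B computes every cell of the result in one pass by a closed-form index mapping (cell (i,j) comes from (i-i%s+s-1-j%s, j-j%s+i%s)) and assigns each row once.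
import Mathlib
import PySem

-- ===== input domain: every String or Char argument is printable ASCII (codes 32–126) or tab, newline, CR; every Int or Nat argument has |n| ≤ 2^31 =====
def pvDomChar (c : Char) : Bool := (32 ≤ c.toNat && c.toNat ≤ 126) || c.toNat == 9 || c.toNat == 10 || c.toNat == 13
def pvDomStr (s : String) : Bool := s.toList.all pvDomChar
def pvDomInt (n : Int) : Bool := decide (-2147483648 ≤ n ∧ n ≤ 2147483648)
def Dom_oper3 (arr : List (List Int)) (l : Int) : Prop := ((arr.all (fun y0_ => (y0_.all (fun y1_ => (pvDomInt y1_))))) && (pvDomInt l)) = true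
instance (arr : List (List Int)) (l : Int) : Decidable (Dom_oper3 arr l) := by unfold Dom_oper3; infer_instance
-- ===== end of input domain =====

-- B computes the clockwise rotation of every 2^l block by a closed-form index mapping in one
-- pass instead of A's extract / rotateRight / copy-back per block; same return value, and like A
-- it mutates arr in place (each row's first n cells are reassigned, any longer tail is kept).

-- ===== PORT A =====
-- arr[i][j] read: exact for the nonnegative in-range indices A uses under Pre_ (default never hit there)
def pvGet2 (g : List (List Int)) (i j : Nat) : Int := (g.getD i []).getD j 0
-- arr[i][j] = v write: exact for the nonnegative in-range indices A uses under Pre_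
def pvSet2 (g : List (List Int)) (i j : Nat) (v : Int) : List (List Int) :=
  g.modify i (fun r => r.set j v)
-- range(0, n, s) for s ≥ 1 (A's step s = 2**l ≥ 1 under Pre_): closed form of the builtin
def pvStepRange (n s : Nat) : List Nat := (List.range ((n + s - 1) / s)).map (· * s)

def pvRotateRight (a : List (List Int)) : List (List Int) :=
  let n := a.length
  let m := (a.getD 0 []).length
  let init := List.replicate m (List.replicate n (0 : Int))
  (List.range n).foldl (fun res i =>
    (List.range m).foldl (fun res j => pvSet2 res j (n - 1 - i) (pvGet2 a i j)) res) init

-- s = 2**l as a Nat: exact for l ≥ 0 (Pre_ excludes l < 0, where Python's 2**l is a float and range raises)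
def oper3 (arr : List (List Int)) (l : Int) : List (List Int) :=
  let n := arr.length
  let s := 2 ^ l.toNat
  (pvStepRange n s).foldl (fun g x =>
    (pvStepRange n s).foldl (fun g y =>
      let tmp := (List.range s).foldl (fun tmp i =>
        tmp ++ [(List.range s).foldl (fun row j => row ++ [pvGet2 g (x + i) (y + j)]) []]) []
      let tmp2 := pvRotateRight tmp
      (List.range s).foldl (fun g i =>
        (List.range s).foldl (fun g j => pvSet2 g (x + i) (y + j) (pvGet2 tmp2 i j)) g) g) g) arr

-- ===== PORT B =====
def oper3_alt (arr : List (List Int)) (l : Int) : List (List Int) :=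
  let n := arr.length
  let s := 2 ^ l.toNat
  let newRows := (List.range n).map (fun i => (List.range n).map (fun j =>
    pvGet2 arr (i - i % s + (s - 1) - j % s) (j - j % s + i % s)))
  -- arr[i][:n] = new_rows[i]
  (List.range n).foldl (fun g i => g.modify i (fun row => newRows.getD i [] ++ row.drop n)) arr

-- ===== PRECONDITION & SPEC =====
-- Exactly the inputs on which the Python A returns: l ≥ 0 (for l < 0, 2**l is a float and range
-- raises TypeError), every row at least n = len(arr) long (a shorter row raises IndexError), and
-- 2^l dividing n when n > 0 (otherwise the last block overruns the grid and raises IndexError).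
-- The conjunct l.toNat < arr.length is IMPLIED by the divisibility (2^l ∣ n ∧ 0 < n → 2^l ≤ n,
-- and l < 2^l); it is stated only so the Decidable instance never computes an astronomically
-- large power — it excludes no input A returns on.
def Pre_oper3 (arr : List (List Int)) (l : Int) : Prop :=
  0 ≤ l ∧ (∀ row ∈ arr, arr.length ≤ row.length) ∧
    (arr.length = 0 ∨ (l.toNat < arr.length ∧ 2 ^ l.toNat ∣ arr.length))
instance (arr : List (List Int)) (l : Int) : Decidable (Pre_oper3 arr l) := by
  unfold Pre_oper3; infer_instance
def pvWitness_oper3 : List (List Int) × Int := ([[1, 2], [3, 4]], 1)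

def Spec_oper3 (arr : List (List Int)) (l : Int) (out : List (List Int)) : Prop := out = oper3_alt arr l
instance (arr : List (List Int)) (l : Int) (out : List (List Int)) : Decidable (Spec_oper3 arr l out) := by
  unfold Spec_oper3; infer_instance

-- ===== CLAIM (what is proved, stated in full; the proofs are below) =====
def Claim_equal_oper3 : Prop := ∀ (arr : List (List Int)) (l : Int), Dom_oper3 arr l → Pre_oper3 arr l → Spec_oper3 arr l (oper3 arr l)

-- ===== LEMMAS AND PROOFS =====

theorem pvGet2_set2 (g : List (List Int)) (i j : Nat) (v : Int) (a b : Nat)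
    (hi : i < g.length) (hj : j < (g.getD i []).length) :
    pvGet2 (pvSet2 g i j v) a b = if a = i ∧ b = j then v else pvGet2 g a b := by
  have hg : g[i]? = some (g[i]'hi) := List.getElem?_eq_getElem hi
  have hj' : j < (g[i]'hi).length := by
    simpa [List.getD_eq_getElem?_getD, hg] using hj
  simp only [pvGet2, pvSet2, List.getD_eq_getElem?_getD, List.getElem?_modify]
  by_cases ha : a = i
  · subst ha
    simp only [if_pos rfl, hg, Option.map_some, Option.getD_some, List.getElem?_set]
    by_cases hb : b = j
    · subst hb; simp [hj', hg]
    · have hjb : ¬ (j = b) := fun h => hb h.symm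
      simp [hjb, hb, hg]
  · have hia : ¬ (i = a) := fun h => ha h.symm
    have hand : ¬ (a = i ∧ b = j) := fun h => ha h.1
    simp [hia, hand]

theorem pvSet2_length (g : List (List Int)) (i j : Nat) (v : Int) :
    (pvSet2 g i j v).length = g.length := by simp [pvSet2]

theorem pvSet2_row_length (g : List (List Int)) (i j : Nat) (v : Int) (a : Nat) :
    ((pvSet2 g i j v).getD a []).length = (g.getD a []).length := by
  simp only [pvSet2, List.getD_eq_getElem?_getD, List.getElem?_modify]
  by_cases h : i = a
  · simp only [h]; cases g[a]? <;> simp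
  · simp [h]

def pvWriteAll (g : List (List Int)) (ps : List (Nat × Nat)) (v : Nat → Nat → Int) : List (List Int) :=
  ps.foldl (fun g q => pvSet2 g q.1 q.2 (v q.1 q.2)) g

theorem pvWriteAll_length (g : List (List Int)) (ps : List (Nat × Nat)) (v : Nat → Nat → Int) :
    (pvWriteAll g ps v).length = g.length := by
  induction ps generalizing g with
  | nil => rfl
  | cons q ps ih => simp [pvWriteAll, List.foldl_cons] at ih ⊢; rw [ih, pvSet2_length]

theorem pvWriteAll_row_length (g : List (List Int)) (ps : List (Nat × Nat)) (v : Nat → Nat → Int) (a : Nat) :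
    ((pvWriteAll g ps v).getD a []).length = (g.getD a []).length := by
  induction ps generalizing g with
  | nil => rfl
  | cons q ps ih => simp only [pvWriteAll, List.foldl_cons] at ih ⊢; rw [ih, pvSet2_row_length]

theorem pvWriteAll_get2 (ps : List (Nat × Nat)) (g : List (List Int)) (v : Nat → Nat → Int) (a b : Nat)
    (h : ∀ q ∈ ps, q.1 < g.length ∧ q.2 < (g.getD q.1 []).length) :
    pvGet2 (pvWriteAll g ps v) a b = if (a, b) ∈ ps then v a b else pvGet2 g a b := by
  induction ps generalizing g with
  | nil => simp [pvWriteAll]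
  | cons q ps ih =>
    have hq := h q (by simp)
    have h' : ∀ p ∈ ps, p.1 < (pvSet2 g q.1 q.2 (v q.1 q.2)).length ∧
        p.2 < ((pvSet2 g q.1 q.2 (v q.1 q.2)).getD p.1 []).length := by
      intro p hp
      rw [pvSet2_length, pvSet2_row_length]
      exact h p (by simp [hp])
    simp only [pvWriteAll, List.foldl_cons] at ih ⊢
    rw [ih _ h']
    by_cases hmem : (a, b) ∈ ps
    · simp [hmem]
    · rw [if_neg hmem, pvGet2_set2 _ _ _ _ _ _ hq.1 hq.2]
      by_cases he : (a, b) = q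
      · obtain ⟨qa, qb⟩ := q
        cases he
        simp
      · have : ¬ (a = q.1 ∧ b = q.2) := by
          intro hc; exact he (by cases q; simp at hc ⊢; exact ⟨hc.1, hc.2⟩)
        simp [this, he, hmem]

theorem pvRotateRight_eq_writeAll (a : List (List Int)) :
    pvRotateRight a = pvWriteAll
      (List.replicate (a.getD 0 []).length (List.replicate a.length (0 : Int)))
      ((List.range a.length).flatMap (fun i =>
        (List.range (a.getD 0 []).length).map (fun j => (j, a.length - 1 - i))))
      (fun p q => pvGet2 a (a.length - 1 - q) p) := by
  unfold pvRotateRight pvWriteAll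
  rw [List.foldl_flatMap]
  apply PySem.List.foldl_congr_mem
  intro g i hi
  rw [List.foldl_map]
  apply PySem.List.foldl_congr_mem
  intro g' j hj
  have hi' : i < a.length := List.mem_range.mp hi
  have : a.length - 1 - (a.length - 1 - i) = i := by omega
  simp [this]

theorem pvRotateRight_get2 (a : List (List Int)) (p q : Nat) :
    pvGet2 (pvRotateRight a) p q =
      if p < (a.getD 0 []).length ∧ q < a.length then pvGet2 a (a.length - 1 - q) p else 0 := by
  rw [pvRotateRight_eq_writeAll]
  rw [pvWriteAll_get2]
  · have hmem : ((p, q) ∈ (List.range a.length).flatMap (fun i =>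
        (List.range (a.getD 0 []).length).map (fun j => (j, a.length - 1 - i)))) ↔
        (p < (a.getD 0 []).length ∧ q < a.length) := by
      simp only [List.mem_flatMap, List.mem_map, List.mem_range]
      constructor
      · rintro ⟨i, hi, j, hj, he⟩
        cases he; exact ⟨hj, by omega⟩
      · rintro ⟨hp, hq⟩
        exact ⟨a.length - 1 - q, by omega, p, hp, by simp; omega⟩
    by_cases h : p < (a.getD 0 []).length ∧ q < a.length
    · rw [if_pos (hmem.mpr h), if_pos h]
    · rw [if_neg (fun hc => h (hmem.mp hc)), if_neg h]
      -- reading the untouched zero grid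
      simp only [pvGet2, List.getD_eq_getElem?_getD, List.getElem?_replicate]
      split_ifs <;> simp
  · intro x hx
    simp only [List.mem_flatMap, List.mem_map, List.mem_range] at hx
    obtain ⟨i, hi, j, hj, he⟩ := hx
    cases he
    constructor
    · simpa using hj
    · rw [List.getD_eq_getElem?_getD, List.getElem?_replicate_of_lt hj]
      simp; omega

-- pvGet2 on an explicit map-of-range grid

theorem pvGet2_mapmap (s : Nat) (F : Nat → Nat → Int) (i j : Nat) :
    pvGet2 ((List.range s).map (fun i => (List.range s).map (F i))) i j =
      if i < s ∧ j < s then F i j else 0 := by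
  simp only [pvGet2, List.getD_eq_getElem?_getD, List.getElem?_map]
  by_cases hi : i < s
  · rw [List.getElem?_range hi]
    simp only [Option.map_some, Option.getD_some]
    by_cases hj : j < s
    · rw [List.getElem?_map, List.getElem?_range hj]; simp [hi, hj]
    · rw [List.getElem?_map, List.getElem?_eq_none (by simp; omega)]; simp [hj]
  · rw [show (List.range s)[i]? = none from
      List.getElem?_eq_none (by rw [List.length_range]; omega)]
    simp [hi]

-- A's per-block body

def pvBlock (s : Nat) (g : List (List Int)) (x y : Nat) : List (List Int) :=
  let tmp := (List.range s).foldl (fun tmp i =>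
    tmp ++ [(List.range s).foldl (fun row j => row ++ [pvGet2 g (x + i) (y + j)]) []]) []
  let tmp2 := pvRotateRight tmp
  (List.range s).foldl (fun g i =>
    (List.range s).foldl (fun g j => pvSet2 g (x + i) (y + j) (pvGet2 tmp2 i j)) g) g

theorem pvBlock_eq_writeAll (s : Nat) (g : List (List Int)) (x y : Nat) :
    pvBlock s g x y = pvWriteAll g
      ((List.range s).flatMap (fun i => (List.range s).map (fun j => (x + i, y + j))))
      (fun a b => pvGet2 (pvRotateRight ((List.range s).map (fun i =>
        (List.range s).map (fun j => pvGet2 g (x + i) (y + j))))) (a - x) (b - y)) := by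
  unfold pvBlock pvWriteAll
  rw [List.foldl_flatMap]
  have htmp : (List.range s).foldl (fun tmp i =>
      tmp ++ [(List.range s).foldl (fun row j => row ++ [pvGet2 g (x + i) (y + j)]) []]) [] =
      (List.range s).map (fun i => (List.range s).map (fun j => pvGet2 g (x + i) (y + j))) := by
    rw [PySem.List.foldl_append_singleton_eq_map]
    simp only [List.nil_append]
    apply List.map_congr_left
    intro i _
    rw [PySem.List.foldl_append_singleton_eq_map]
    simp
  rw [htmp]
  apply PySem.List.foldl_congr_mem
  intro g' i _
  rw [List.foldl_map]
  apply PySem.List.foldl_congr_mem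
  intro g'' j _
  simp

theorem pvBlock_length (s : Nat) (g : List (List Int)) (x y : Nat) :
    (pvBlock s g x y).length = g.length := by
  rw [pvBlock_eq_writeAll, pvWriteAll_length]

theorem pvBlock_row_length (s : Nat) (g : List (List Int)) (x y a : Nat) :
    ((pvBlock s g x y).getD a []).length = (g.getD a []).length := by
  rw [pvBlock_eq_writeAll, pvWriteAll_row_length]

theorem pvBlock_get2 (s : Nat) (g : List (List Int)) (x y a b : Nat) (hs : 0 < s)
    (hx : x + s ≤ g.length) (hrow : ∀ i, i < s → y + s ≤ (g.getD (x + i) []).length) :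
    pvGet2 (pvBlock s g x y) a b =
      if x ≤ a ∧ a < x + s ∧ y ≤ b ∧ b < y + s then
        pvGet2 g (x + (s - 1 - (b - y))) (y + (a - x))
      else pvGet2 g a b := by
  rw [pvBlock_eq_writeAll]
  set tmp := (List.range s).map (fun i => (List.range s).map (fun j => pvGet2 g (x + i) (y + j)))
    with htmp
  have htmp_len : tmp.length = s := by simp [htmp]
  have htmp_row0 : (tmp.getD 0 []).length = s := by
    rw [htmp, List.getD_eq_getElem?_getD, List.getElem?_map, List.getElem?_range hs]
    simp
  rw [pvWriteAll_get2]
  · have hmem : ((a, b) ∈ (List.range s).flatMap (fun i =>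
        (List.range s).map (fun j => (x + i, y + j)))) ↔
        (x ≤ a ∧ a < x + s ∧ y ≤ b ∧ b < y + s) := by
      simp only [List.mem_flatMap, List.mem_map, List.mem_range, Prod.mk.injEq]
      constructor
      · rintro ⟨i, hi, j, hj, hea, heb⟩; omega
      · rintro ⟨h1, h2, h3, h4⟩
        exact ⟨a - x, by omega, b - y, by omega, by omega, by omega⟩
    by_cases h : x ≤ a ∧ a < x + s ∧ y ≤ b ∧ b < y + s
    · rw [if_pos (hmem.mpr h), if_pos h]
      rw [pvRotateRight_get2, htmp_row0, htmp_len, if_pos (by omega)]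
      rw [htmp, pvGet2_mapmap, if_pos (by omega)]
    · rw [if_neg (fun hc => h (hmem.mp hc)), if_neg h]
  · intro q hq
    simp only [List.mem_flatMap, List.mem_map, List.mem_range] at hq
    obtain ⟨i, hi, j, hj, rfl⟩ := hq
    refine ⟨by simp; omega, ?_⟩
    show y + j < (g.getD (x + i) []).length
    exact lt_of_lt_of_le (by omega) (hrow i hi)

def pvTgt (arr : List (List Int)) (s a b : Nat) : Int :=
  pvGet2 arr (a - a % s + (s - 1) - b % s) (b - b % s + a % s)

def pvT' (arr : List (List Int)) (s a b : Nat) : Int :=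
  if a < arr.length ∧ b < arr.length then pvTgt arr s a b else pvGet2 arr a b

theorem mod_of_block {s x a : Nat} (hx : s ∣ x) (h1 : x ≤ a) (h2 : a < x + s) :
    a % s = a - x := by
  obtain ⟨c, rfl⟩ := hx
  conv_lhs => rw [show a = s * c + (a - s * c) from by omega]
  rw [Nat.mul_add_mod]
  exact Nat.mod_eq_of_lt (by omega : a - s * c < s)

theorem block_origin_unique {s x x' a : Nat} (hx : s ∣ x) (hx' : s ∣ x')
    (h1 : x ≤ a) (h2 : a < x + s) (h1' : x' ≤ a) (h2' : a < x' + s) : x = x' := by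
  have e1 := mod_of_block hx h1 h2
  have e2 := mod_of_block hx' h1' h2'
  omega

theorem blocks_fold (arr : List (List Int)) (s : Nat) (hs : 0 < s)
    (hrows : ∀ row ∈ arr, arr.length ≤ row.length) :
    ∀ (R : List (Nat × Nat)), R.Nodup →
    (∀ q ∈ R, s ∣ q.1 ∧ s ∣ q.2 ∧ q.1 + s ≤ arr.length ∧ q.2 + s ≤ arr.length) →
    ∀ g : List (List Int), g.length = arr.length →
    (∀ a, (g.getD a []).length = (arr.getD a []).length) →
    (∀ a b, pvGet2 g a b =
      if ∃ q ∈ R, q.1 ≤ a ∧ a < q.1 + s ∧ q.2 ≤ b ∧ b < q.2 + s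
      then pvGet2 arr a b else pvT' arr s a b) →
    ((R.foldl (fun g q => pvBlock s g q.1 q.2) g).length = arr.length ∧
     (∀ a, ((R.foldl (fun g q => pvBlock s g q.1 q.2) g).getD a []).length
        = (arr.getD a []).length) ∧
     (∀ a b, pvGet2 (R.foldl (fun g q => pvBlock s g q.1 q.2) g) a b = pvT' arr s a b)) := by
  intro R
  induction R with
  | nil =>
    intro _ _ g hlen hrlen hinv
    refine ⟨hlen, hrlen, ?_⟩
    intro a b
    have := hinv a b
    simpa using this
  | cons q R' ih =>
    intro hnd hR g hlen hrlen hinv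
    obtain ⟨x, y⟩ := q
    have hq := hR (x, y) (by simp)
    obtain ⟨hdx, hdy, hxs, hys⟩ := hq
    have hx : x + s ≤ g.length := by omega
    have hrow : ∀ i, i < s → y + s ≤ (g.getD (x + i) []).length := by
      intro i hi
      rw [hrlen]
      have hlt : x + i < arr.length := by omega
      have hmem : arr.getD (x + i) [] ∈ arr := by
        rw [List.getD_eq_getElem?_getD, List.getElem?_eq_getElem hlt]
        exact List.getElem_mem hlt
      have := hrows _ hmem
      omega
    simp only [List.foldl_cons]
    apply ih
    · exact hnd.of_cons
    · intro q' hq'; exact hR q' (by simp [hq'])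
    · rw [pvBlock_length]; exact hlen
    · intro a; rw [pvBlock_row_length]; exact hrlen a
    · -- the new invariant after processing block (x, y)
      intro a b
      rw [pvBlock_get2 s g x y a b hs hx hrow]
      by_cases hin : x ≤ a ∧ a < x + s ∧ y ≤ b ∧ b < y + s
      · rw [if_pos hin]
        -- the read position lies inside block (x,y), still untouched
        have hread := hinv (x + (s - 1 - (b - y))) (y + (a - x))
        rw [if_pos ⟨(x, y), by simp, by simp; omega⟩] at hread
        rw [hread]
        -- no block of R' contains (a,b)
        have hnone : ¬ ∃ q' ∈ R', q'.1 ≤ a ∧ a < q'.1 + s ∧ q'.2 ≤ b ∧ b < q'.2 + s := by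
          rintro ⟨q', hq', h1, h2, h3, h4⟩
          have hc := hR q' (by simp [hq'])
          have ex : q'.1 = x := block_origin_unique hc.1 hdx h1 h2 hin.1 hin.2.1
          have ey : q'.2 = y := block_origin_unique hc.2.1 hdy h3 h4 hin.2.2.1 hin.2.2.2
          have : q' = (x, y) := by
            cases q'; simp at ex ey ⊢; exact ⟨ex, ey⟩
          subst this
          exact (List.nodup_cons.mp hnd).1 hq'
        rw [if_neg hnone]
        -- compute the target value
        have hma : a % s = a - x := mod_of_block hdx hin.1 hin.2.1
        have hmb : b % s = b - y := mod_of_block hdy hin.2.2.1 hin.2.2.2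
        rw [pvT', if_pos (by omega)]
        rw [pvTgt, hma, hmb]
        have e1 : a - (a - x) + (s - 1) - (b - y) = x + (s - 1 - (b - y)) := by omega
        have e2 : b - (b - y) + (a - x) = y + (a - x) := by omega
        rw [e1, e2]
      · rw [if_neg hin, hinv a b]
        by_cases hex : ∃ q' ∈ R', q'.1 ≤ a ∧ a < q'.1 + s ∧ q'.2 ≤ b ∧ b < q'.2 + s
        · rw [if_pos hex, if_pos]
          obtain ⟨q', h1, h2⟩ := hex
          exact ⟨q', by simp [h1], h2⟩
        · rw [if_neg hex, if_neg]
          rintro ⟨q', hq', hcond⟩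
          simp only [List.mem_cons] at hq'
          rcases hq' with rfl | hq'
          · exact hin hcond
          · exact hex ⟨q', hq', hcond⟩

theorem pvStepRange_dvd (n s : Nat) (hs : 0 < s) (hd : s ∣ n) :
    pvStepRange n s = (List.range (n / s)).map (· * s) := by
  obtain ⟨k, rfl⟩ := hd
  have h1 : (s * k + s - 1) / s = k := by
    rw [show s * k + s - 1 = s * k + (s - 1) from by omega, Nat.mul_add_div hs,
      Nat.div_eq_of_lt (by omega)]
    omega
  have h2 : s * k / s = k := Nat.mul_div_cancel_left k hs
  unfold pvStepRange
  rw [h1, h2]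

theorem foldl_modify_length (ps : List Nat) (F : Nat → List Int → List Int) (g : List (List Int)) :
    (ps.foldl (fun g i => g.modify i (F i)) g).length = g.length := by
  induction ps generalizing g with
  | nil => rfl
  | cons p ps ih => simp only [List.foldl_cons]; rw [ih]; simp

theorem foldl_modify_getD (ps : List Nat) (F : Nat → List Int → List Int) (g : List (List Int))
    (hnd : ps.Nodup) (hin : ∀ i ∈ ps, i < g.length) (a : Nat) :
    (ps.foldl (fun g i => g.modify i (F i)) g).getD a [] =
      if a ∈ ps then F a (g.getD a []) else g.getD a [] := by
  induction ps generalizing g with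
  | nil => simp
  | cons p ps ih =>
    have hp : p < g.length := hin p (by simp)
    have hgp : g[p]? = some (g[p]'hp) := List.getElem?_eq_getElem hp
    simp only [List.foldl_cons]
    rw [ih _ hnd.of_cons (by intro i hi; simpa using hin i (by simp [hi]))]
    by_cases hmem : a ∈ ps
    · rw [if_pos hmem, if_pos (by simp [hmem])]
      have hap : ¬ p = a := fun h => (List.nodup_cons.mp hnd).1 (by rw [h]; exact hmem)
      congr 1
      simp only [List.getD_eq_getElem?_getD, List.getElem?_modify]
      simp [hap]
    · rw [if_neg hmem]
      by_cases hap : a = p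
      · subst hap
        rw [if_pos (by simp)]
        simp only [List.getD_eq_getElem?_getD, List.getElem?_modify, hgp]
        simp
      · rw [if_neg (by simp [hap, hmem])]
        simp only [List.getD_eq_getElem?_getD, List.getElem?_modify]
        simp [show ¬ p = a from fun h => hap h.symm]

-- the two ports (as in the final file)

theorem oper3_eq_blocks (arr : List (List Int)) (l : Int) :
    oper3 arr l = (pvStepRange arr.length (2 ^ l.toNat)).foldl (fun g x =>
      (pvStepRange arr.length (2 ^ l.toNat)).foldl (fun g y =>
        pvBlock (2 ^ l.toNat) g x y) g) arr := rfl

theorem lt_div_mul_add' (a s : Nat) (hs : 0 < s) : a < a / s * s + s := by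
  have h1 := Nat.div_add_mod a s
  have h2 := Nat.mod_lt a hs
  rw [Nat.mul_comm]
  omega

theorem main_equiv (arr : List (List Int)) (l : Int)
    (hrows : ∀ row ∈ arr, arr.length ≤ row.length)
    (hcase : arr.length = 0 ∨ (l.toNat < arr.length ∧ 2 ^ l.toNat ∣ arr.length)) :
    oper3 arr l = oper3_alt arr l := by
  have hs : 0 < 2 ^ l.toNat := Nat.two_pow_pos l.toNat
  rcases hcase with hn0 | ⟨_, hdvd⟩
  · obtain rfl : arr = [] := List.length_eq_zero_iff.mp hn0
    have h0 : (2 ^ l.toNat - 1) / 2 ^ l.toNat = 0 := Nat.div_eq_of_lt (by omega)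
    simp [oper3, oper3_alt, pvStepRange, h0]
  · set n := arr.length with hn
    set s := 2 ^ l.toNat with hsdef
    set xs := pvStepRange n s with hxs
    set L := xs ×ˢ xs with hL
    have hbound : ∀ x ∈ xs, s ∣ x ∧ x + s ≤ n := by
      intro x hx
      rw [hxs, pvStepRange_dvd n s hs hdvd] at hx
      simp only [List.mem_map, List.mem_range] at hx
      obtain ⟨u, hu, rfl⟩ := hx
      refine ⟨dvd_mul_left s u, ?_⟩
      calc u * s + s = (u + 1) * s := by ring
        _ ≤ (n / s) * s := Nat.mul_le_mul_right s hu
        _ = n := Nat.div_mul_cancel hdvd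
    have hxs_nodup : xs.Nodup := by
      rw [hxs, pvStepRange_dvd n s hs hdvd]
      exact List.Nodup.map (fun u v h => Nat.eq_of_mul_eq_mul_right hs h) List.nodup_range
    have hL_nodup : L.Nodup := List.Nodup.product hxs_nodup hxs_nodup
    have hLcond : ∀ q ∈ L, s ∣ q.1 ∧ s ∣ q.2 ∧ q.1 + s ≤ n ∧ q.2 + s ≤ n := by
      intro q hq
      obtain ⟨hq1, hq2⟩ := List.mem_product.mp hq
      exact ⟨(hbound q.1 hq1).1, (hbound q.2 hq2).1, (hbound q.1 hq1).2, (hbound q.2 hq2).2⟩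
    have hinv0 : ∀ a b, pvGet2 arr a b =
        if ∃ q ∈ L, q.1 ≤ a ∧ a < q.1 + s ∧ q.2 ≤ b ∧ b < q.2 + s
        then pvGet2 arr a b else pvT' arr s a b := by
      intro a b
      by_cases hex : ∃ q ∈ L, q.1 ≤ a ∧ a < q.1 + s ∧ q.2 ≤ b ∧ b < q.2 + s
      · rw [if_pos hex]
      · rw [if_neg hex, pvT', if_neg]
        rintro ⟨ha, hb⟩
        apply hex
        refine ⟨(a / s * s, b / s * s), ?_, ?_, ?_, ?_, ?_⟩
        · apply List.mem_product.mpr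
          constructor <;>
            (rw [hxs, pvStepRange_dvd n s hs hdvd]
             simp only [List.mem_map, List.mem_range]
             exact ⟨_, Nat.div_lt_div_of_lt_of_dvd hdvd (by omega), rfl⟩)
        · exact Nat.div_mul_le_self a s
        · exact lt_div_mul_add' a s hs
        · exact Nat.div_mul_le_self b s
        · exact lt_div_mul_add' b s hs
    have hA := blocks_fold arr s hs hrows L hL_nodup hLcond arr rfl (fun _ => rfl) hinv0
    have hAeq : oper3 arr l = L.foldl (fun g q => pvBlock s g q.1 q.2) arr := by
      rw [oper3_eq_blocks]
      show _ = (xs.flatMap (fun x => xs.map (fun y => (x, y)))).foldl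
        (fun g q => pvBlock s g q.1 q.2) arr
      rw [List.foldl_flatMap]
      simp only [List.foldl_map]
      rfl
    obtain ⟨hAlen, hArow, hAval⟩ := hA
    rw [← hAeq] at hAlen hArow hAval
    -- B side characterization
    have hBlen : (oper3_alt arr l).length = n := by
      unfold oper3_alt
      rw [foldl_modify_length]
    have hBrow : ∀ a, a < n →
        (oper3_alt arr l).getD a [] =
          ((List.range n).map (fun j =>
            pvGet2 arr (a - a % s + (s - 1) - j % s) (j - j % s + a % s))) ++
            (arr.getD a []).drop n := by
      intro a ha
      unfold oper3_alt
      rw [foldl_modify_getD _ _ _ List.nodup_range (by intro i hi; simpa using hi) a]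
      rw [if_pos (List.mem_range.mpr ha)]
      congr 1
      rw [PySem.List.getD_map_range]
      exact ha
    have hrlen : ∀ a, a < n → n ≤ (arr.getD a []).length := by
      intro a ha
      apply hrows
      rw [List.getD_eq_getElem?_getD, List.getElem?_eq_getElem ha]
      exact List.getElem_mem ha
    apply List.ext_getElem (by rw [hAlen, hBlen])
    intro a h1 h2
    have ha : a < n := by rw [hAlen] at h1; exact h1
    rw [← List.getD_eq_getElem (oper3 arr l) [] h1,
        ← List.getD_eq_getElem (oper3_alt arr l) [] h2]
    rw [hBrow a ha]
    apply List.ext_getElem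
    · rw [hArow a]
      simp only [List.length_append, List.length_map, List.length_range, List.length_drop]
      have := hrlen a ha
      omega
    · intro b hb1 hb2
      have hblen : b < (arr.getD a []).length := by rw [hArow a] at hb1; exact hb1
      have hAv : ((oper3 arr l).getD a [])[b]'hb1 = pvT' arr s a b := by
        have h := hAval a b
        simp only [pvGet2] at h
        rw [List.getD_eq_getElem _ 0 hb1] at h
        exact h
      rw [hAv]
      by_cases hbn : b < n
      · rw [List.getElem_append_left (by simpa using hbn)]
        rw [pvT', if_pos ⟨ha, hbn⟩]
        simp only [List.getElem_map, List.getElem_range]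
        rfl
      · rw [List.getElem_append_right (by simpa using hbn)]
        rw [pvT', if_neg (by omega)]
        simp only [List.getElem_drop, List.length_map, List.length_range]
        simp only [pvGet2]
        rw [List.getD_eq_getElem _ 0 hblen]
        congr 1
        omega

-- ===== VERDICT (by name: the statement is the Claim_ definition above) =====
theorem oper3_spec : Claim_equal_oper3 := by
  intro arr l _ hpre
  obtain ⟨_, hrows, hcase⟩ := hpre
  show oper3 arr l = oper3_alt arr l
  exact main_equiv arr l hrows hcase
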